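-- pv_equiv track=rewrite | github.com/vermashresth/Google-AI | third_pilot_code/rmab_individual_clustering_pilot.py | get_gmm_labels
-- ===== SOURCE A (Python) =====
-- def get_gmm_labels(labels):
--     n_clusters = max(set(labels)) + 1
--     missing_labels = list()
--     for i in range(n_clusters):
--         if i not in set(labels):
--             missing_labels.append(i)
--     x = n_clusters
--     added_labels = list()
--     for label in missing_labels:
--         x = x - 1
--         while True:
--             if x in missing_labels and x not in added_labels:
--                 x -= 1
--             else:
--                 break
--         if label > x:
--             continue
--         for i in range(len(labels)):
--             if labels[i] == x:
--                 labels[i] = label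
--         added_labels.append(label)
--
--     return labels
-- ===== SOURCE B (Python) =====
-- def get_gmm_labels(labels):
--     # Mutates labels in place (like the original) and returns it.
--     present = set(labels)
--     n = max(present) + 1          # ValueError on empty input, like the original
--     gaps = [i for i in range(n) if i not in present]
--     desc = sorted(present, reverse=True)
--     mapping = {}
--     i = 0
--     for g in gaps:
--         if i >= len(desc) or g > desc[i]:
--             break
--         mapping[desc[i]] = g
--         i += 1
--     labels[:] = [mapping.get(v, v) for v in labels]
--     return labels
-- ===== Notes on version B (the rewrite author's own statement) =====
-- stated objective: faster
-- what changed: A fills each gap by an integer count-down walk that rescans the missing/added lists and rescans all of labels per gap; B sorts the distinct labels descending once, pairs gaps (ascending) with present values (descending) by a two-pointer walk into a remap dictionary, and relabels in one final pass.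
import Mathlib
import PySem

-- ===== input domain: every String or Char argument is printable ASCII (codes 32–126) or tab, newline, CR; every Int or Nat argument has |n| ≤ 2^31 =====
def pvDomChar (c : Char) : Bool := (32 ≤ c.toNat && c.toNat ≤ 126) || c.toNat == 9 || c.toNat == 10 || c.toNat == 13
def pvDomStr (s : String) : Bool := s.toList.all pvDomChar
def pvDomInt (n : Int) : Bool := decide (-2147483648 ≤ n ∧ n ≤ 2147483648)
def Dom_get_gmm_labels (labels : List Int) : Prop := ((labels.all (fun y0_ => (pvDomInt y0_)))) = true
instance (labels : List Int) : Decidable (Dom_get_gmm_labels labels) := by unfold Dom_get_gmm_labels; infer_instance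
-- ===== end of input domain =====

-- B replaces A's per-gap integer count-down walk (with repeated membership rescans and a full
-- relabel pass per gap) by one descending sort of the distinct labels, a two-pointer pairing of
-- gaps with present values into a remap dictionary, and a single final relabel pass.
-- Both A and B mutate `labels` in place in Python (same final contents); the theorem is about the
-- returned value.


-- ===== PORT A =====
-- Python's inner `while True: if x in missing_labels and x not in added_labels: x -= 1 else: break`.
-- The `0 ≤ x` test is only a termination guard: in A, `missing` ⊆ range(n_clusters), so whenever
-- the Python loop decrements, x is nonnegative and the guard is satisfied.
-- Structural fuel recursion (so the kernel can evaluate it); the fuel `(x+1).toNat + 1` always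
-- suffices because each decrement step requires `0 ≤ x`, so at most x+1 decrements can happen.
def pvWhileSkipGo (missing added : List Int) : Nat → Int → Int
  | 0, x => x
  | fuel + 1, x =>
    if x ∈ missing ∧ x ∉ added then
      if 0 ≤ x then pvWhileSkipGo missing added fuel (x - 1) else x
    else x

def pvWhileSkip (missing added : List Int) (x : Int) : Int :=
  pvWhileSkipGo missing added ((x + 1).toNat + 1) x

-- one iteration of A's `for label in missing_labels` loop; state = (x, added_labels, labels);
-- the `for i in range(len(labels)): if labels[i] == x: labels[i] = label` pass is the map.
def pvStepA (missing : List Int) (st : Int × List Int × List Int) (label : Int) :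
    Int × List Int × List Int :=
  let x := pvWhileSkip missing st.2.1 (st.1 - 1)
  if label > x then (x, st.2.1, st.2.2)
  else (x, st.2.1 ++ [label], st.2.2.map (fun v => if v = x then label else v))

def get_gmm_labels (labels : List Int) : List Int :=
  match PySem.List.max? (PySem.Set.ofList labels) (fun v => v) with
  | none => []  -- Python raises ValueError on empty input; excluded by Pre_
  | some m =>
    let n_clusters := m + 1
    let missing := (PySem.List.pyRange 0 n_clusters 1).foldl
      (fun acc i => if i ∉ PySem.Set.ofList labels then acc ++ [i] else acc) []
    (missing.foldl (pvStepA missing) (n_clusters, [], labels)).2.2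

-- ===== PORT B =====
-- B's `for g in gaps: if i >= len(desc) or g > desc[i]: break; mapping[desc[i]] = g; i += 1`
def pvBuildMap (desc : List Int) : List Int → Nat → PySem.Dict Int Int → PySem.Dict Int Int
  | [], _, d => d
  | g :: gs, i, d =>
    match desc[i]? with
    | none => d
    | some v => if g > v then d else pvBuildMap desc gs (i + 1) (d.insert v g)

def get_gmm_labels_alt (labels : List Int) : List Int :=
  let present := PySem.Set.ofList labels
  match PySem.List.max? present (fun v => v) with
  | none => []  -- Python raises ValueError on empty input; excluded by Pre_
  | some m =>
    let n := m + 1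
    let gaps := (PySem.List.pyRange 0 n 1).filter (fun i => decide (i ∉ present))
    let desc := PySem.List.sorted present (fun v => v) true
    let mapping := pvBuildMap desc gaps 0 PySem.Dict.empty
    labels.map (fun v => mapping.getD v v)

-- ===== PRECONDITION & SPEC =====
-- Pre_ excludes only the empty list, on which Python A raises ValueError (max of empty set).
def Pre_get_gmm_labels (labels : List Int) : Prop := labels ≠ []
instance (labels : List Int) : Decidable (Pre_get_gmm_labels labels) := by
  unfold Pre_get_gmm_labels; infer_instance

def pvWitness_get_gmm_labels : List Int := [2, 5, 2, 0]

def Spec_get_gmm_labels (labels : List Int) (out : List Int) : Prop := out = get_gmm_labels_alt labels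
instance (labels : List Int) (out : List Int) : Decidable (Spec_get_gmm_labels labels out) := by
  unfold Spec_get_gmm_labels; infer_instance

-- ===== CLAIM (what is proved, stated in full; the proofs are below) =====
def Claim_equal_get_gmm_labels : Prop := ∀ (labels : List Int), Dom_get_gmm_labels labels → Pre_get_gmm_labels labels → Spec_get_gmm_labels labels (get_gmm_labels labels)

-- ===== LEMMAS AND PROOFS =====

-- Characterisation of the count-down walk: it stops at the largest value ≤ x that is not in
-- missing \ added (assuming missing holds only nonnegative values, so the guard never fires).
lemma pvWhileSkipGo_spec (missing added : List Int) (hpos : ∀ y ∈ missing, 0 ≤ y) :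
    ∀ (fuel : Nat) (x : Int), (x + 1).toNat + 1 ≤ fuel →
    pvWhileSkipGo missing added fuel x ≤ x ∧
    ¬(pvWhileSkipGo missing added fuel x ∈ missing ∧ pvWhileSkipGo missing added fuel x ∉ added) ∧
    (∀ z, pvWhileSkipGo missing added fuel x < z → z ≤ x → (z ∈ missing ∧ z ∉ added)) := by
  intro fuel
  induction fuel with
  | zero => intro x hx; omega
  | succ f ih =>
    intro x hx
    by_cases hc : x ∈ missing ∧ x ∉ added
    · have hx0 : 0 ≤ x := hpos x hc.1
      have hstep : pvWhileSkipGo missing added (f + 1) x = pvWhileSkipGo missing added f (x - 1) := by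
        simp only [pvWhileSkipGo]; rw [if_pos hc, if_pos hx0]
      obtain ⟨h1, h2, h3⟩ := ih (x - 1) (by omega)
      rw [hstep]
      refine ⟨by omega, h2, ?_⟩
      intro z hz1 hz2
      by_cases hzx : z = x
      · exact hzx ▸ hc
      · exact h3 z hz1 (by omega)
    · have hstep : pvWhileSkipGo missing added (f + 1) x = x := by
        simp only [pvWhileSkipGo]; rw [if_neg hc]
      rw [hstep]
      exact ⟨le_refl x, hc, fun z h1 h2 => absurd (lt_of_lt_of_le h1 h2) (lt_irrefl x)⟩

lemma pvWhileSkip_spec (missing added : List Int) (hpos : ∀ y ∈ missing, 0 ≤ y) (x : Int) :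
    pvWhileSkip missing added x ≤ x ∧
    ¬(pvWhileSkip missing added x ∈ missing ∧ pvWhileSkip missing added x ∉ added) ∧
    (∀ z, pvWhileSkip missing added x < z → z ≤ x → (z ∈ missing ∧ z ∉ added)) :=
  pvWhileSkipGo_spec missing added hpos ((x + 1).toNat + 1) x (le_refl _)

-- Dead phase: once every remaining gap exceeds x, every remaining iteration is a `continue`.
lemma pvDead (missing added lab : List Int) (hpos : ∀ y ∈ missing, 0 ≤ y) :
    ∀ (gs : List Int) (x : Int), (∀ g ∈ gs, x < g) →
      (gs.foldl (pvStepA missing) (x, added, lab)).2.2 = lab := by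
  intro gs
  induction gs with
  | nil => intro x _; rfl
  | cons g gs ih =>
    intro x h
    have hw := (pvWhileSkip_spec missing added hpos (x - 1)).1
    have hgx : pvWhileSkip missing added (x - 1) < g := by
      have := h g (by simp); omega
    have hstep : pvStepA missing (x, added, lab) g
        = (pvWhileSkip missing added (x - 1), added, lab) := by
      simp only [pvStepA]
      rw [if_pos hgx]
    rw [List.foldl_cons, hstep]
    exact ih (pvWhileSkip missing added (x - 1))
      (fun g' hg' => by have := h g' (List.mem_cons_of_mem _ hg'); omega)

-- Main invariant: A's outer fold computes the relabelling described by B's two-pointer dictionary.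
lemma pvMain (labels missing desc : List Int) (n : Int)
    (hm : ∀ y, y ∈ missing ↔ (0 ≤ y ∧ y < n ∧ y ∉ labels)) :
    ∀ (gs : List Int), ∀ (x : Int) (added lab rest : List Int) (i : Nat) (d : PySem.Dict Int Int),
    (∀ g ∈ gs, g ∈ missing) → gs.Pairwise (· < ·) →
    (∀ a ∈ added, ∀ g ∈ gs, a < g) →
    (∀ v, v ∈ rest ↔ (v ∈ labels ∧ v < x)) → rest.Pairwise (· > ·) →
    desc.drop i = rest →
    d.keys.Nodup →
    (∀ p ∈ d.items, p.1 ∈ labels ∧ x ≤ p.1 ∧ p.2 ∉ labels) →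
    lab = labels.map (fun v => d.getD v v) →
    x ≤ n →
    (gs.foldl (pvStepA missing) (x, added, lab)).2.2
      = labels.map (fun v => (pvBuildMap desc gs i d).getD v v) := by
  have hpos : ∀ y ∈ missing, 0 ≤ y := fun y hy => ((hm y).1 hy).1
  intro gs
  induction gs with
  | nil =>
    intro x added lab rest i d _ _ _ _ _ _ _ _ hlab _
    simpa [pvBuildMap] using hlab
  | cons g gs ih =>
    intro x added lab rest i d hsub hsort hadd hrest hrsort hdrop hnodup hitems hlab hxn
    have hgmiss : g ∈ missing := hsub g (by simp)
    obtain ⟨hg0, hgn, hglab⟩ := (hm g).1 hgmiss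
    obtain ⟨hw1, hw2, hw3⟩ := pvWhileSkip_spec missing added hpos (x - 1)
    set r := pvWhileSkip missing added (x - 1) with hrdef
    by_cases hle : g ≤ r
    · -- TAKE: r is the next present value (head of rest); both sides record gap g ↦ value r
      have hrna : r ∉ added := fun h => absurd (hadd r h g (by simp)) (by omega)
      have hrnm : r ∉ missing := fun h => hw2 ⟨h, hrna⟩
      have hrx : r < x := by omega
      have hrlab : r ∈ labels := by
        by_contra h
        exact hrnm ((hm r).2 ⟨by omega, by omega, h⟩)
      have hrmem : r ∈ rest := (hrest r).2 ⟨hrlab, hrx⟩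
      obtain ⟨h0, t, hrest_eq⟩ : ∃ h0 t, rest = h0 :: t := by
        cases rest with
        | nil => exact absurd hrmem (by simp)
        | cons a b => exact ⟨a, b, rfl⟩
      subst hrest_eq
      have hh0 : h0 = r := by
        by_contra hne
        rcases lt_or_gt_of_ne hne with hlt | hgt
        · rcases List.mem_cons.1 hrmem with h | h
          · exact hne h.symm
          · have : h0 > r := (List.pairwise_cons.1 hrsort).1 r h
            omega
        · obtain ⟨h0lab, h0x⟩ := (hrest h0).1 (by simp)
          have : h0 ∈ missing ∧ h0 ∉ added := hw3 h0 (by omega) (by omega)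
          exact absurd h0lab ((hm h0).1 this.1).2.2
      subst hh0
      -- A's step takes the else branch (¬ g > r)
      have hstepA : pvStepA missing (x, added, lab) g
          = (r, added ++ [g], lab.map (fun v => if v = r then g else v)) := by
        simp only [pvStepA]
        rw [if_neg (by omega : ¬ g > r)]
      -- B's step reads desc[i]? = some r and inserts
      have hgeti : desc[i]? = some r := by
        have : (desc.drop i)[0]? = some r := by rw [hdrop]; rfl
        simpa using this
      have hstepB : pvBuildMap desc (g :: gs) i d
          = pvBuildMap desc gs (i + 1) (d.insert r g) := by
        simp only [pvBuildMap, hgeti]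
        rw [if_neg (by omega : ¬ g > r)]
      rw [List.foldl_cons, hstepA, hstepB]
      -- re-establish the invariant and apply the induction hypothesis
      have hnotkey : d.contains r = false := by
        by_contra hc
        have hsome : (d.get? r).isSome := by
          rw [← PySem.Dict.contains_eq_isSome_get?]
          exact Bool.of_not_eq_false hc
        obtain ⟨w, hw⟩ := Option.isSome_iff_exists.1 hsome
        have : (r, w) ∈ d.items := PySem.Dict.mem_items_of_get?_eq_some _ hw
        have := (hitems _ this).2.1
        omega
      refine ih r (added ++ [g]) _ t (i + 1) (d.insert r g)
        (fun g' hg' => hsub g' (List.mem_cons_of_mem _ hg'))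
        ((List.pairwise_cons.1 hsort).2)
        ?hadd ?hrest ((List.pairwise_cons.1 hrsort).2) ?hdrop
        (PySem.Dict.nodup_keys_insert _ _ _ hnodup) ?hitems ?hlab (by omega)
      case hadd =>
        intro a ha g' hg'
        rcases List.mem_append.1 ha with h | h
        · exact hadd a h g' (List.mem_cons_of_mem _ hg')
        · simp at h
          exact h ▸ (List.pairwise_cons.1 hsort).1 g' hg'
      case hrest =>
        intro v
        constructor
        · intro hv
          obtain ⟨hvl, _⟩ := (hrest v).1 (List.mem_cons_of_mem _ hv)
          exact ⟨hvl, (List.pairwise_cons.1 hrsort).1 v hv⟩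
        · intro ⟨hvl, hvr⟩
          rcases List.mem_cons.1 ((hrest v).2 ⟨hvl, by omega⟩) with h | h
          · omega
          · exact h
      case hdrop =>
        rw [← List.tail_drop, hdrop]
        rfl
      case hitems =>
        intro p hp
        rcases (PySem.Dict.mem_items_insert _ _ _ _).1 hp with h | ⟨h, _⟩
        · rw [h]
          exact ⟨hrlab, le_refl r, hglab⟩
        · obtain ⟨h1, h2, h3⟩ := hitems p h
          exact ⟨h1, by omega, h3⟩
      case hlab =>
        rw [hlab, List.map_map]
        refine List.map_congr_left ?_
        intro v hv
        by_cases hvr : v = r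
        · subst hvr
          simp only [Function.comp]
          rw [PySem.Dict.getD_of_not_contains _ _ hnotkey, if_pos rfl,
            PySem.Dict.getD_insert_self]
        · simp only [Function.comp]
          rw [PySem.Dict.getD_insert_of_ne _ _ _ hvr]
          have hne : d.getD v v ≠ r := by
            by_cases hc : d.contains v
            · have hsome : (d.get? v).isSome := by
                rw [← PySem.Dict.contains_eq_isSome_get?, hc]
              obtain ⟨w, hwv⟩ := Option.isSome_iff_exists.1 hsome
              rw [PySem.Dict.getD_of_get?_eq_some _ _ hwv]
              have : w ∉ labels := (hitems _ (PySem.Dict.mem_items_of_get?_eq_some _ hwv)).2.2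
              exact fun hwr => this (hwr ▸ hrlab)
            · rw [PySem.Dict.getD_of_not_contains _ _ (by simpa using hc)]
              exact hvr
          rw [if_neg hne]
    · -- BREAK: g > r, and B's pointer also stops (rest empty or its head < g)
      have hstepA : pvStepA missing (x, added, lab) g = (r, added, lab) := by
        simp only [pvStepA]
        rw [if_pos (by omega : g > r)]
      have hstepB : pvBuildMap desc (g :: gs) i d = d := by
        cases hr : rest with
        | nil =>
          have hgeti : desc[i]? = none := by
            have : (desc.drop i)[0]? = none := by rw [hdrop, hr]; rfl
            simpa using this
          simp [pvBuildMap, hgeti]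
        | cons h0 t =>
          have hgeti : desc[i]? = some h0 := by
            have : (desc.drop i)[0]? = some h0 := by rw [hdrop, hr]; rfl
            simpa using this
          have hgh0 : g > h0 := by
            by_contra hc
            obtain ⟨h0lab, h0x⟩ := (hrest h0).1 (by rw [hr]; simp)
            have : h0 ∈ missing ∧ h0 ∉ added := hw3 h0 (by omega) (by omega)
            exact absurd h0lab ((hm h0).1 this.1).2.2
          simp [pvBuildMap, hgeti, hgh0]
      rw [List.foldl_cons, hstepA, hstepB, ← hlab]
      refine pvDead missing added lab hpos gs r ?_
      intro g' hg'
      have := (List.pairwise_cons.1 hsort).1 g' hg'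
      omega

-- ===== VERDICT (by name: the statement is the Claim_ definition above) =====
theorem get_gmm_labels_spec : Claim_equal_get_gmm_labels := by
  intro labels _ _
  unfold Spec_get_gmm_labels get_gmm_labels get_gmm_labels_alt
  dsimp only
  cases hmax : PySem.List.max? (PySem.Set.ofList labels) (fun v => v) with
  | none => rfl
  | some m =>
    have hmm : m ∈ labels := (PySem.Set.mem_ofList _ _).1 (PySem.List.max?_mem hmax)
    have hub : ∀ v ∈ labels, v ≤ m := fun v hv =>
      PySem.List.max?_isMax hmax v ((PySem.Set.mem_ofList _ _).2 hv)
    simp only [PySem.List.foldl_append_ite_eq_filter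
      (fun i => i ∉ PySem.Set.ofList labels) _ [], List.nil_append]
    refine pvMain labels _ _ (m + 1) ?hm _ (m + 1) [] labels _ 0 PySem.Dict.empty
      (fun g hg => hg) ?hsort (by simp) ?hrest ?hrsort List.drop_zero
      ?hnodup ?hitems ?hlab (le_refl _)
    case hm =>
      intro y
      simp only [List.mem_filter, PySem.List.mem_pyRange_one, PySem.Set.mem_ofList,
        decide_eq_true_eq]
      tauto
    case hsort => exact (PySem.List.pairwise_lt_pyRange_one 0 (m + 1)).filter _
    case hrest =>
      intro v
      simp only [PySem.List.mem_sorted, PySem.Set.mem_ofList]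
      exact ⟨fun h => ⟨h, by have := hub v h; omega⟩, fun h => h.1⟩
    case hrsort =>
      have h1 := PySem.List.sorted_pairwise_rev (PySem.Set.ofList labels) (fun v => v)
      have h2 : (PySem.List.sorted (PySem.Set.ofList labels) (fun v => v) true).Nodup :=
        (PySem.List.sorted_perm (PySem.Set.ofList labels) (fun v => v) true).nodup_iff.2
          (PySem.Set.nodup_ofList labels)
      exact (h1.and h2).imp (by intro a b h; have := h.1; have := h.2; omega)
    case hnodup => exact PySem.Dict.nodup_keys_empty
    case hitems => intro p hp; simp [PySem.Dict.empty] at hp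
    case hlab =>
      have : List.map (fun v => PySem.Dict.empty.getD v v) labels = labels := by
        refine (List.map_congr_left (fun v _ => PySem.Dict.getD_empty v v)).trans
          (List.map_id labels)
      exact this.symm
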